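-- pv_equiv track=rewrite | github.com/shaham-noorani/BalanceBlocks | src/calendar/get_past_events.py | five_or_more_days_have_at_least_two_events
-- ===== SOURCE A (Python) =====
-- def five_or_more_days_have_at_least_two_events(events):
--     events_by_day = {}
--     for event in events:
--         day = event["start"][:10]
--         if day not in events_by_day:
--             events_by_day[day] = []
--         events_by_day[day].append(event)
--
--     events_per_day = [len(events_by_day[day]) for day in events_by_day]
--     return sum([1 for num_events in events_per_day if num_events >= 2]) >= 5
-- ===== SOURCE B (Python) =====
-- def five_or_more_days_have_at_least_two_events(events):
--     days = sorted(event["start"][:10] for event in events)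
--     busy = 0
--     while days:
--         d = days[0]
--         run = 1
--         while run < len(days) and days[run] == d:
--             run += 1
--         if run >= 2:
--             busy += 1
--         days = days[run:]
--     return busy >= 5
-- ===== Notes on version B (the rewrite author's own statement) =====
-- stated objective: alternative
-- what changed: Replaces A's dict-of-lists hash grouping and two comprehension passes by sorting the day keys and counting maximal runs of length >= 2 in one run-length scan over the sorted list.
import Mathlib
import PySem

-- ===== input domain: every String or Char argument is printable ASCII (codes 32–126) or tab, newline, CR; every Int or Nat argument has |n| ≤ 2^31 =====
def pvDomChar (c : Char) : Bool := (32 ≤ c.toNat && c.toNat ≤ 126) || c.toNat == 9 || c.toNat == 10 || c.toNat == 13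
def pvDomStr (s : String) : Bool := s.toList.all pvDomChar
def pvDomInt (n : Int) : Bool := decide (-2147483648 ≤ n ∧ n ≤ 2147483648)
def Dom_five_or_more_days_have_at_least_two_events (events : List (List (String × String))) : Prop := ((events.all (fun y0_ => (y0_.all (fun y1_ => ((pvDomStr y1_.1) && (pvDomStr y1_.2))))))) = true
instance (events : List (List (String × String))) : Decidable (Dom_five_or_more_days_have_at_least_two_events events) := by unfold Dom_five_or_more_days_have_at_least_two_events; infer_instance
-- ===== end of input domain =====

-- B replaces A's dict-of-lists grouping by sorting the day keys and counting runs of length ≥ 2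
-- in one scan of the sorted list (alternative algorithm, not claimed faster).


-- ===== PORT A =====
-- event["start"][:10]  (shared by both ports; the KeyError case is excluded by Pre_, see below)
def pvDayOf (event : List (String × String)) : String :=
  PySem.Str.slice ((PySem.Dict.mk event).getD "start" "") none (some 10)

def five_or_more_days_have_at_least_two_events (events : List (List (String × String))) : Bool :=
  let events_by_day : PySem.Dict String (List (List (String × String))) :=
    events.foldl (fun d event =>
      let day := pvDayOf event
      let d1 := if d.contains day then d else d.insert day []
      d1.insert day (d1.getD day [] ++ [event])) PySem.Dict.empty
  let events_per_day : List Int :=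
    events_by_day.keys.map (fun day => ((events_by_day.getD day []).length : Int))
  decide (5 ≤ ((events_per_day.filter (fun n => decide (2 ≤ n))).map (fun _ => (1 : Int))).sum)

-- ===== PORT B =====
-- the run-length scan over the sorted day list ('while days: … days = days[run:]')
def pvRunCount : List String → Nat
  | [] => 0
  | d :: rest =>
    (if 2 ≤ (rest.takeWhile (fun x => x == d)).length + 1 then 1 else 0)
      + pvRunCount (rest.dropWhile (fun x => x == d))
termination_by l => l.length
decreasing_by
  simpa using Nat.lt_succ_of_le (List.length_dropWhile_le _ _)

def five_or_more_days_have_at_least_two_events_alt (events : List (List (String × String))) : Bool :=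
  let days := PySem.List.sorted (events.map pvDayOf) (fun x => x) false
  decide (5 ≤ pvRunCount days)

-- ===== PRECONDITION & SPEC =====
-- Pre_ excludes exactly the events without a "start" key, on which Python A raises KeyError.
def Pre_five_or_more_days_have_at_least_two_events (events : List (List (String × String))) : Prop :=
  ∀ e ∈ events, "start" ∈ e.map Prod.fst
instance (events : List (List (String × String))) : Decidable (Pre_five_or_more_days_have_at_least_two_events events) := by unfold Pre_five_or_more_days_have_at_least_two_events; infer_instance
def pvWitness_five_or_more_days_have_at_least_two_events : (List (List (String × String))) :=
  [[("start", "2024-01-02T10:00")]]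

def Spec_five_or_more_days_have_at_least_two_events (events : List (List (String × String))) (out : Bool) : Prop := out = five_or_more_days_have_at_least_two_events_alt events
instance (events : List (List (String × String))) (out : Bool) : Decidable (Spec_five_or_more_days_have_at_least_two_events events out) := by unfold Spec_five_or_more_days_have_at_least_two_events; infer_instance

-- ===== CLAIM (what is proved, stated in full; the proofs are below) =====
def Claim_equal_five_or_more_days_have_at_least_two_events : Prop := ∀ (events : List (List (String × String))), Dom_five_or_more_days_have_at_least_two_events events → Pre_five_or_more_days_have_at_least_two_events events → Spec_five_or_more_days_have_at_least_two_events events (five_or_more_days_have_at_least_two_events events)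

-- ===== LEMMAS AND PROOFS =====

-- the common value: number of distinct days with at least two events
def pvBusy (days : List String) : Nat :=
  (PySem.Set.ofList days).countP (fun d => decide (2 ≤ days.count d))

-- countP of a predicate over any nodup list with the same members
lemma countP_eq_of_nodup_mem {l₁ l₂ : List String} (p : String → Bool)
    (h₁ : l₁.Nodup) (h₂ : l₂.Nodup) (h : ∀ a, a ∈ l₁ ↔ a ∈ l₂) :
    l₁.countP p = l₂.countP p :=
  ((List.perm_ext_iff_of_nodup h₁ h₂).mpr h).countP_eq p

-- inserting twice at an absent key collapses to one insert
lemma insert_insert_absent (d : PySem.Dict String (List (List (String × String))))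
    (k : String) (v v' : List (List (String × String))) (hc : d.contains k = false) :
    (d.insert k v').insert k v = d.insert k v := by
  apply PySem.Dict.ext
  rw [PySem.Dict.items_insert_of_contains _ _ (PySem.Dict.contains_insert_self _ _ _),
      PySem.Dict.items_insert_of_not_contains _ _ hc,
      PySem.Dict.items_insert_of_not_contains _ _ hc]
  rw [List.map_append]
  congr 1
  · conv_rhs => rw [← List.map_id d.items]
    apply List.map_congr_left
    intro p hp
    have hne : p.1 ≠ k := by
      intro h
      have h2 := PySem.Dict.mem_keys_of_mem_items _ hp
      rw [h] at h2
      rw [(PySem.Dict.contains_iff_mem_keys d k).mpr h2] at hc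
      exact Bool.noConfusion hc
    simp only [beq_iff_eq, hne, if_false, id]
  · simp only [List.map_cons, List.map_nil, beq_self_eq_true, if_true]


-- A-side: the dict loop step is Dict.modify
lemma stepA_eq_modify (d : PySem.Dict String (List (List (String × String))))
    (event : List (String × String)) :
    (let day := pvDayOf event
     let d1 := if d.contains day then d else d.insert day []
     d1.insert day (d1.getD day [] ++ [event]))
    = d.modify (pvDayOf event) [] (· ++ [event]) := by
  show (let d1 := if d.contains (pvDayOf event) then d else d.insert (pvDayOf event) []
        d1.insert (pvDayOf event) (d1.getD (pvDayOf event) [] ++ [event]))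
      = d.modify (pvDayOf event) [] (· ++ [event])
  by_cases h : d.contains (pvDayOf event) = true
  · simp only [h, if_true]
    rfl
  · have hc : d.contains (pvDayOf event) = false := by simpa using h
    simp only [hc, Bool.false_eq_true, if_false, PySem.Dict.modify]
    rw [PySem.Dict.getD_insert_self, PySem.Dict.getD_of_not_contains d _ hc]
    exact insert_insert_absent d _ _ _ hc

lemma A_eq_busy (events : List (List (String × String))) :
    five_or_more_days_have_at_least_two_events events
      = decide (5 ≤ pvBusy (events.map pvDayOf)) := by
  have hA : five_or_more_days_have_at_least_two_events events
      = decide (5 ≤ ((((events.foldl (fun d event =>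
          let day := pvDayOf event
          let d1 := if d.contains day then d else d.insert day []
          d1.insert day (d1.getD day [] ++ [event])) PySem.Dict.empty).keys.map
            (fun day => (((events.foldl (fun d event =>
              let day := pvDayOf event
              let d1 := if d.contains day then d else d.insert day []
              d1.insert day (d1.getD day [] ++ [event])) PySem.Dict.empty).getD day []).length : Int))).filter
          (fun n => decide (2 ≤ n))).map (fun _ => (1 : Int))).sum) := rfl
  rw [hA]
  have hfold : events.foldl (fun d event =>
      let day := pvDayOf event
      let d1 := if d.contains day then d else d.insert day []
      d1.insert day (d1.getD day [] ++ [event])) PySem.Dict.empty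
      = events.foldl (fun d e => d.modify (pvDayOf e) [] (· ++ [e])) PySem.Dict.empty :=
    PySem.List.foldl_congr_mem _ _ _ _ (fun acc x _ => stepA_eq_modify acc x)
  rw [hfold]
  have hkeys : (events.foldl (fun d e => d.modify (pvDayOf e) [] (· ++ [e]))
      PySem.Dict.empty).keys = PySem.Set.ofList (events.map pvDayOf) :=
    PySem.Dict.keys_foldl_modify_key events pvDayOf [] (fun _ x => (· ++ [x])) PySem.Dict.empty
  rw [hkeys]
  have hgetD : ∀ c, ((events.foldl (fun d e => d.modify (pvDayOf e) [] (· ++ [e]))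
      PySem.Dict.empty).getD c []).length = (events.map pvDayOf).count c := by
    intro c
    have hmap : events.foldl (fun d e => d.modify (pvDayOf e) [] (· ++ [e])) PySem.Dict.empty
        = (events.map (fun e => (pvDayOf e, e))).foldl
            (fun d p => d.modify p.1 [] (· ++ [p.2])) PySem.Dict.empty := by
      rw [List.foldl_map]
    rw [hmap, PySem.Dict.getD_foldl_modify_append, PySem.Dict.getD_empty, List.nil_append,
        List.length_map, ← List.countP_eq_length_filter, List.countP_map, List.count,
        List.countP_map]
    rfl
  have hlist : (PySem.Set.ofList (events.map pvDayOf)).map (fun day =>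
      (((events.foldl (fun d e => d.modify (pvDayOf e) [] (· ++ [e]))
        PySem.Dict.empty).getD day []).length : Int))
      = (PySem.Set.ofList (events.map pvDayOf)).map (fun day =>
          (((events.map pvDayOf).count day : Nat) : Int)) := by
    apply List.map_congr_left
    intro day _
    rw [hgetD]
  rw [hlist]
  rw [List.filter_map, List.map_map]
  rw [show ((fun _ => (1:Int)) ∘ (fun day => (((events.map pvDayOf).count day : Nat) : Int)))
      = (fun _ => (1:Int)) from rfl]
  rw [PySem.List.sum_map_const_int, ← List.countP_eq_length_filter]
  have hcount : (PySem.Set.ofList (events.map pvDayOf)).countP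
      ((fun n => decide (2 ≤ n)) ∘ (fun day => (((events.map pvDayOf).count day : Nat) : Int)))
      = pvBusy (events.map pvDayOf) := by
    apply List.countP_congr
    intro x _
    simp only [Function.comp]
    constructor <;> · intro h; simp only [decide_eq_true_eq] at h ⊢; exact_mod_cast h
  rw [hcount, decide_eq_decide]
  constructor <;> · intro h; omega
-- helper: the first element surviving dropWhile fails the predicate
lemma dropWhile_head_false {α : Type} (p : α → Bool) :
    ∀ (l : List α) (a : α) (t : List α), l.dropWhile p = a :: t → p a = false := by
  intro l
  induction l with
  | nil => intro a t h; simp [List.dropWhile] at h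
  | cons x xs ih =>
    intro a t h
    rw [List.dropWhile_cons] at h
    by_cases hx : p x = true
    · rw [if_pos hx] at h; exact ih a t h
    · rw [if_neg hx] at h
      cases h
      simpa using hx

-- B-side: run counting over a sorted list counts the distinct values with count ≥ 2
lemma runCount_eq_busy (s : List String) : s.Pairwise (· ≤ ·) → pvRunCount s = pvBusy s := by
  induction s using pvRunCount.induct with
  | case1 => intro _; simp [pvRunCount, pvBusy]
  | case2 d rest ih =>
    intro hs
    have hrest : rest.Pairwise (· ≤ ·) := (List.pairwise_cons.mp hs).2
    have hd_le : ∀ x ∈ rest, d ≤ x := (List.pairwise_cons.mp hs).1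
    set run := rest.takeWhile (fun x => x == d) with hrun
    set rem := rest.dropWhile (fun x => x == d) with hrem
    have hsplit : run ++ rem = rest := List.takeWhile_append_dropWhile
    have hrun_eq : ∀ x ∈ run, x = d := by
      intro x hx
      simpa using List.mem_takeWhile_imp hx
    have hrem_pw : rem.Pairwise (· ≤ ·) :=
      List.Pairwise.sublist (List.dropWhile_sublist _) hrest
    have hrem_sub : ∀ x ∈ rem, x ∈ rest := fun x hx =>
      (List.dropWhile_sublist _).mem hx
    have hrem_ne_d : ∀ x ∈ rem, x ≠ d := by
      cases hmatch : rem with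
      | nil => intro x hx; simp at hx
      | cons a t =>
        have ha : (a == d) = false :=
          dropWhile_head_false _ rest a t (by rw [← hrem, hmatch])
        have hane : a ≠ d := by simpa using ha
        have hamem : a ∈ rest := hrem_sub a (by rw [hmatch]; exact List.mem_cons_self ..)
        have hda : d < a := lt_of_le_of_ne (hd_le a hamem) (Ne.symm hane)
        intro x hx
        rcases List.mem_cons.mp hx with rfl | hxt
        · exact hane
        · have hax : a ≤ x := List.rel_of_pairwise_cons (hmatch ▸ hrem_pw) hxt
          intro hxd
          rw [hxd] at hax
          exact absurd (lt_of_lt_of_le hda hax) (lt_irrefl d)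
    have hrun_count : run.count d = run.length :=
      List.count_eq_length.mpr (fun b hb => (hrun_eq b hb).symm)
    have hrem_count_d : rem.count d = 0 :=
      List.count_eq_zero.mpr (fun hd => (hrem_ne_d d hd) rfl)
    have hrest_count : rest.count d = run.length := by
      rw [← hsplit, List.count_append, hrun_count, hrem_count_d]
      omega
    have hcount_d : (d :: rest).count d = run.length + 1 := by
      rw [List.count_cons_self, hrest_count]
    have hcount_x : ∀ x ∈ rem, (d :: rest).count x = rem.count x := by
      intro x hx
      have hxd := hrem_ne_d x hx
      have hxrun : run.count x = 0 :=
        List.count_eq_zero.mpr (fun hmem => hxd (hrun_eq x hmem))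
      have h1 : (d :: rest).count x = rest.count x := by
        rw [List.count_cons]
        simp [Ne.symm hxd]
      rw [h1, ← hsplit, List.count_append, hxrun, Nat.zero_add]
    have hd_notin : d ∉ PySem.Set.ofList rem := by
      rw [PySem.Set.mem_ofList]
      intro hd
      exact (hrem_ne_d d hd) rfl
    have nodup2 : (d :: PySem.Set.ofList rem).Nodup :=
      List.nodup_cons.mpr ⟨hd_notin, PySem.Set.nodup_ofList _⟩
    have hmem2 : ∀ a, a ∈ PySem.Set.ofList (d :: rest) ↔ a ∈ d :: PySem.Set.ofList rem := by
      intro a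
      rw [PySem.Set.mem_ofList, List.mem_cons, List.mem_cons, PySem.Set.mem_ofList, ← hsplit,
          List.mem_append]
      constructor
      · rintro (rfl | hr | hm)
        · exact Or.inl rfl
        · exact Or.inl (hrun_eq a hr)
        · exact Or.inr hm
      · rintro (rfl | hm)
        · exact Or.inl rfl
        · exact Or.inr (Or.inr hm)
    have hbusy : pvBusy (d :: rest)
        = (if 2 ≤ run.length + 1 then 1 else 0) + pvBusy rem := by
      unfold pvBusy
      rw [countP_eq_of_nodup_mem _ (PySem.Set.nodup_ofList _) nodup2 hmem2, List.countP_cons]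
      have hif : (if decide (2 ≤ (d :: rest).count d) = true then 1 else 0)
          = (if 2 ≤ run.length + 1 then (1 : Nat) else 0) := by
        rw [hcount_d]; simp
      have hcong : (PySem.Set.ofList rem).countP (fun x => decide (2 ≤ (d :: rest).count x))
          = (PySem.Set.ofList rem).countP (fun x => decide (2 ≤ rem.count x)) := by
        apply List.countP_congr
        intro x hx
        rw [hcount_x x ((PySem.Set.mem_ofList _ _).mp hx)]
      rw [hcong, hif, Nat.add_comm]
    rw [pvRunCount, ← hrun, ← hrem, hbusy, ih hrem_pw]

lemma B_eq_busy (events : List (List (String × String))) :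
    five_or_more_days_have_at_least_two_events_alt events
      = decide (5 ≤ pvBusy (events.map pvDayOf)) := by
  have hB : five_or_more_days_have_at_least_two_events_alt events
      = decide (5 ≤ pvRunCount (PySem.List.sorted (events.map pvDayOf) (fun x => x) false)) := rfl
  rw [hB]
  have hperm : (PySem.List.sorted (events.map pvDayOf) (fun x => x) false).Perm
      (events.map pvDayOf) := PySem.List.sorted_perm _ _ _
  rw [runCount_eq_busy _ (by simpa using PySem.List.sorted_pairwise (events.map pvDayOf) (fun x => x))]
  congr 1
  unfold pvBusy
  have hfun : (fun d => decide (2 ≤ (PySem.List.sorted (events.map pvDayOf) (fun x => x) false).count d))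
      = (fun d => decide (2 ≤ (events.map pvDayOf).count d)) := by
    funext d
    rw [hperm.count_eq d]
  rw [hfun]
  have h := countP_eq_of_nodup_mem
    (l₁ := PySem.Set.ofList (PySem.List.sorted (events.map pvDayOf) (fun x => x) false))
    (l₂ := PySem.Set.ofList (events.map pvDayOf))
    (fun d => decide (2 ≤ (events.map pvDayOf).count d))
    (PySem.Set.nodup_ofList _) (PySem.Set.nodup_ofList _)
    (fun a => by rw [PySem.Set.mem_ofList, PySem.Set.mem_ofList, hperm.mem_iff])
  rw [h]

-- ===== VERDICT (by name: the statement is the Claim_ definition above) =====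
theorem five_or_more_days_have_at_least_two_events_spec : Claim_equal_five_or_more_days_have_at_least_two_events := by
  intro events _ _
  unfold Spec_five_or_more_days_have_at_least_two_events
  rw [A_eq_busy, B_eq_busy]
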